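-- pv_equiv track=rewrite | github.com/zhengxueqian01/Edit-Verify-Reason | src/chart_agent/perception/scatter_svg_updater.py | _color_aliases
-- ===== SOURCE A (Python) =====
-- def _color_aliases(color: str) -> set[str]:
--     token = str(color or "").strip().lower()
--     aliases = {token} if token else set()
--     canonical = {
--         "red": {"#ff0000", "#d62728", "#e41a1c", "#ff3b30"},
--         "blue": {"#0000ff", "#1f77b4", "#4c78a8", "#007aff"},
--         "green": {"#008000", "#2ca02c", "#4daf4a", "#34c759"},
--         "orange": {"#ff7f0e", "#ff9500", "#ffa500"},
--         "purple": {"#9467bd", "#800080", "#af52de"},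
--         "pink": {"#ff1493", "#e377c2"},
--         "yellow": {"#bcbd22", "#ffff00", "#ffd60a"},
--         "cyan": {"#17becf", "#00ffff"},
--         "gray": {"#7f7f7f", "#808080"},
--         "black": {"#000000"},
--         "white": {"#ffffff"},
--         "brown": {"#8c564b", "#a0522d"},
--     }
--     for name, values in canonical.items():
--         if token == name or token in values:
--             aliases.add(name)
--             aliases.update(values)
--     return aliases
-- ===== SOURCE B (Python) =====
-- # Flat literal alias index: one dict lookup, no per-entry loop.
-- _INDEX = {
--     'red': ('red', '#ff0000', '#d62728', '#e41a1c', '#ff3b30'),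
--     '#ff0000': ('red', '#ff0000', '#d62728', '#e41a1c', '#ff3b30'),
--     '#d62728': ('red', '#ff0000', '#d62728', '#e41a1c', '#ff3b30'),
--     '#e41a1c': ('red', '#ff0000', '#d62728', '#e41a1c', '#ff3b30'),
--     '#ff3b30': ('red', '#ff0000', '#d62728', '#e41a1c', '#ff3b30'),
--     'blue': ('blue', '#0000ff', '#1f77b4', '#4c78a8', '#007aff'),
--     '#0000ff': ('blue', '#0000ff', '#1f77b4', '#4c78a8', '#007aff'),
--     '#1f77b4': ('blue', '#0000ff', '#1f77b4', '#4c78a8', '#007aff'),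
--     '#4c78a8': ('blue', '#0000ff', '#1f77b4', '#4c78a8', '#007aff'),
--     '#007aff': ('blue', '#0000ff', '#1f77b4', '#4c78a8', '#007aff'),
--     'green': ('green', '#008000', '#2ca02c', '#4daf4a', '#34c759'),
--     '#008000': ('green', '#008000', '#2ca02c', '#4daf4a', '#34c759'),
--     '#2ca02c': ('green', '#008000', '#2ca02c', '#4daf4a', '#34c759'),
--     '#4daf4a': ('green', '#008000', '#2ca02c', '#4daf4a', '#34c759'),
--     '#34c759': ('green', '#008000', '#2ca02c', '#4daf4a', '#34c759'),
--     'orange': ('orange', '#ff7f0e', '#ff9500', '#ffa500'),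
--     '#ff7f0e': ('orange', '#ff7f0e', '#ff9500', '#ffa500'),
--     '#ff9500': ('orange', '#ff7f0e', '#ff9500', '#ffa500'),
--     '#ffa500': ('orange', '#ff7f0e', '#ff9500', '#ffa500'),
--     'purple': ('purple', '#9467bd', '#800080', '#af52de'),
--     '#9467bd': ('purple', '#9467bd', '#800080', '#af52de'),
--     '#800080': ('purple', '#9467bd', '#800080', '#af52de'),
--     '#af52de': ('purple', '#9467bd', '#800080', '#af52de'),
--     'pink': ('pink', '#ff1493', '#e377c2'),
--     '#ff1493': ('pink', '#ff1493', '#e377c2'),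
--     '#e377c2': ('pink', '#ff1493', '#e377c2'),
--     'yellow': ('yellow', '#bcbd22', '#ffff00', '#ffd60a'),
--     '#bcbd22': ('yellow', '#bcbd22', '#ffff00', '#ffd60a'),
--     '#ffff00': ('yellow', '#bcbd22', '#ffff00', '#ffd60a'),
--     '#ffd60a': ('yellow', '#bcbd22', '#ffff00', '#ffd60a'),
--     'cyan': ('cyan', '#17becf', '#00ffff'),
--     '#17becf': ('cyan', '#17becf', '#00ffff'),
--     '#00ffff': ('cyan', '#17becf', '#00ffff'),
--     'gray': ('gray', '#7f7f7f', '#808080'),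
--     '#7f7f7f': ('gray', '#7f7f7f', '#808080'),
--     '#808080': ('gray', '#7f7f7f', '#808080'),
--     'black': ('black', '#000000'),
--     '#000000': ('black', '#000000'),
--     'white': ('white', '#ffffff'),
--     '#ffffff': ('white', '#ffffff'),
--     'brown': ('brown', '#8c564b', '#a0522d'),
--     '#8c564b': ('brown', '#8c564b', '#a0522d'),
--     '#a0522d': ('brown', '#8c564b', '#a0522d'),}
--
--
-- def _color_aliases(color: str) -> set[str]:
--     token = str(color or "").strip().lower()
--     if not token:
--         return set()
--     out = {token}
--     out.update(_INDEX.get(token, ()))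
--     return out
-- ===== Notes on version B (the rewrite author's own statement) =====
-- stated objective: simpler
-- what changed: Replaces the per-call loop over all 12 canonical entries (name test plus value-set membership each) by a flat module-level literal index mapping every name and hex value to its whole alias group, so the body is an early return for the empty token plus one dict lookup and one set update.
import Mathlib
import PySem

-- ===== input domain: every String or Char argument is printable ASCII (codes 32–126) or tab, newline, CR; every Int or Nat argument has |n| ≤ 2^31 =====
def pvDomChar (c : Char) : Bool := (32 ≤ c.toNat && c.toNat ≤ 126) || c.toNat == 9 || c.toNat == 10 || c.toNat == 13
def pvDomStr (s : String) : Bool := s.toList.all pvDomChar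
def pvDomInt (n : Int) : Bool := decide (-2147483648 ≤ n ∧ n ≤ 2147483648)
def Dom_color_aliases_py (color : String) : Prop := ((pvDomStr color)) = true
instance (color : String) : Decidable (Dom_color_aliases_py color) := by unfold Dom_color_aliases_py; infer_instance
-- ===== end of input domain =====

-- B replaces A's per-call scan over all 12 canonical entries by a single lookup in a flat
-- precomputed literal index mapping every name/hex key to its full alias group; objective: simpler.
-- Return value is a Python set; the list below holds its distinct elements (compared as a set).

-- ===== PORT A =====
-- A's canonical table (value sets in source order)
def pvCanonical : PySem.Dict String (PySem.Set String) := PySem.Dict.mk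
  [ ("red",    PySem.Set.ofList ["#ff0000", "#d62728", "#e41a1c", "#ff3b30"])
  , ("blue",   PySem.Set.ofList ["#0000ff", "#1f77b4", "#4c78a8", "#007aff"])
  , ("green",  PySem.Set.ofList ["#008000", "#2ca02c", "#4daf4a", "#34c759"])
  , ("orange", PySem.Set.ofList ["#ff7f0e", "#ff9500", "#ffa500"])
  , ("purple", PySem.Set.ofList ["#9467bd", "#800080", "#af52de"])
  , ("pink",   PySem.Set.ofList ["#ff1493", "#e377c2"])
  , ("yellow", PySem.Set.ofList ["#bcbd22", "#ffff00", "#ffd60a"])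
  , ("cyan",   PySem.Set.ofList ["#17becf", "#00ffff"])
  , ("gray",   PySem.Set.ofList ["#7f7f7f", "#808080"])
  , ("black",  PySem.Set.ofList ["#000000"])
  , ("white",  PySem.Set.ofList ["#ffffff"])
  , ("brown",  PySem.Set.ofList ["#8c564b", "#a0522d"]) ]

-- A's body on the stripped, lowered token: seed the set, then scan every table entry
def pvBodyA (t : String) : List String :=
  pvCanonical.items.foldl
    (fun al nv =>
      if t == nv.1 || PySem.Set.contains nv.2 t then
        PySem.Set.update (PySem.Set.add al nv.1) nv.2
      else al)
    (if t ≠ "" then PySem.Set.ofList [t] else PySem.Set.empty)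

def color_aliases_py (color : String) : List String :=
  pvBodyA (PySem.Str.lower (PySem.Str.strip color))

-- ===== PORT B =====
-- Source B's module-level constant _INDEX: every name and hex value -> its whole alias group
def pvIndex : PySem.Dict String (List String) := PySem.Dict.mk
  [ ("red", ["red", "#ff0000", "#d62728", "#e41a1c", "#ff3b30"])
  , ("#ff0000", ["red", "#ff0000", "#d62728", "#e41a1c", "#ff3b30"])
  , ("#d62728", ["red", "#ff0000", "#d62728", "#e41a1c", "#ff3b30"])
  , ("#e41a1c", ["red", "#ff0000", "#d62728", "#e41a1c", "#ff3b30"])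
  , ("#ff3b30", ["red", "#ff0000", "#d62728", "#e41a1c", "#ff3b30"])
  , ("blue", ["blue", "#0000ff", "#1f77b4", "#4c78a8", "#007aff"])
  , ("#0000ff", ["blue", "#0000ff", "#1f77b4", "#4c78a8", "#007aff"])
  , ("#1f77b4", ["blue", "#0000ff", "#1f77b4", "#4c78a8", "#007aff"])
  , ("#4c78a8", ["blue", "#0000ff", "#1f77b4", "#4c78a8", "#007aff"])
  , ("#007aff", ["blue", "#0000ff", "#1f77b4", "#4c78a8", "#007aff"])
  , ("green", ["green", "#008000", "#2ca02c", "#4daf4a", "#34c759"])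
  , ("#008000", ["green", "#008000", "#2ca02c", "#4daf4a", "#34c759"])
  , ("#2ca02c", ["green", "#008000", "#2ca02c", "#4daf4a", "#34c759"])
  , ("#4daf4a", ["green", "#008000", "#2ca02c", "#4daf4a", "#34c759"])
  , ("#34c759", ["green", "#008000", "#2ca02c", "#4daf4a", "#34c759"])
  , ("orange", ["orange", "#ff7f0e", "#ff9500", "#ffa500"])
  , ("#ff7f0e", ["orange", "#ff7f0e", "#ff9500", "#ffa500"])
  , ("#ff9500", ["orange", "#ff7f0e", "#ff9500", "#ffa500"])
  , ("#ffa500", ["orange", "#ff7f0e", "#ff9500", "#ffa500"])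
  , ("purple", ["purple", "#9467bd", "#800080", "#af52de"])
  , ("#9467bd", ["purple", "#9467bd", "#800080", "#af52de"])
  , ("#800080", ["purple", "#9467bd", "#800080", "#af52de"])
  , ("#af52de", ["purple", "#9467bd", "#800080", "#af52de"])
  , ("pink", ["pink", "#ff1493", "#e377c2"])
  , ("#ff1493", ["pink", "#ff1493", "#e377c2"])
  , ("#e377c2", ["pink", "#ff1493", "#e377c2"])
  , ("yellow", ["yellow", "#bcbd22", "#ffff00", "#ffd60a"])
  , ("#bcbd22", ["yellow", "#bcbd22", "#ffff00", "#ffd60a"])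
  , ("#ffff00", ["yellow", "#bcbd22", "#ffff00", "#ffd60a"])
  , ("#ffd60a", ["yellow", "#bcbd22", "#ffff00", "#ffd60a"])
  , ("cyan", ["cyan", "#17becf", "#00ffff"])
  , ("#17becf", ["cyan", "#17becf", "#00ffff"])
  , ("#00ffff", ["cyan", "#17becf", "#00ffff"])
  , ("gray", ["gray", "#7f7f7f", "#808080"])
  , ("#7f7f7f", ["gray", "#7f7f7f", "#808080"])
  , ("#808080", ["gray", "#7f7f7f", "#808080"])
  , ("black", ["black", "#000000"])
  , ("#000000", ["black", "#000000"])
  , ("white", ["white", "#ffffff"])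
  , ("#ffffff", ["white", "#ffffff"])
  , ("brown", ["brown", "#8c564b", "#a0522d"])
  , ("#8c564b", ["brown", "#8c564b", "#a0522d"])
  , ("#a0522d", ["brown", "#8c564b", "#a0522d"])
  ]

def color_aliases_py_alt (color : String) : List String :=
  let token := PySem.Str.lower (PySem.Str.strip color)
  if token = "" then PySem.Set.empty
  else PySem.Set.update (PySem.Set.ofList [token]) (pvIndex.getD token [])

-- ===== PRECONDITION & SPEC =====
def Spec_color_aliases_py (color : String) (out : List String) : Prop := out = color_aliases_py_alt color
instance (color : String) (out : List String) : Decidable (Spec_color_aliases_py color out) := by unfold Spec_color_aliases_py; infer_instance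

-- ===== CLAIM =====
def Claim_equal_color_aliases_py : Prop := ∀ (color : String), Dom_color_aliases_py color → Spec_color_aliases_py color (color_aliases_py color)

-- ===== LEMMAS AND PROOFS =====
-- all names and hex values, in table order
def pvAllKeys : List String :=
  [ "red"
  , "#ff0000"
  , "#d62728"
  , "#e41a1c"
  , "#ff3b30"
  , "blue"
  , "#0000ff"
  , "#1f77b4"
  , "#4c78a8"
  , "#007aff"
  , "green"
  , "#008000"
  , "#2ca02c"
  , "#4daf4a"
  , "#34c759"
  , "orange"
  , "#ff7f0e"
  , "#ff9500"
  , "#ffa500"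
  , "purple"
  , "#9467bd"
  , "#800080"
  , "#af52de"
  , "pink"
  , "#ff1493"
  , "#e377c2"
  , "yellow"
  , "#bcbd22"
  , "#ffff00"
  , "#ffd60a"
  , "cyan"
  , "#17becf"
  , "#00ffff"
  , "gray"
  , "#7f7f7f"
  , "#808080"
  , "black"
  , "#000000"
  , "white"
  , "#ffffff"
  , "brown"
  , "#8c564b"
  , "#a0522d" ]

-- Source B's body on the token, for the key lemma below
def pvBodyB (t : String) : List String :=
  if t = "" then PySem.Set.empty
  else PySem.Set.update (PySem.Set.ofList [t]) (pvIndex.getD t [])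

lemma alt_eq_body (color : String) :
    color_aliases_py_alt color = pvBodyB (PySem.Str.lower (PySem.Str.strip color)) := rfl

set_option maxRecDepth 16384 in
lemma pvBody_eq (t : String) : pvBodyA t = pvBodyB t := by
  by_cases hm : t ∈ pvAllKeys
  · fin_cases hm <;> decide
  · have hf : ∀ s ∈ pvAllKeys, (t == s) = false := by
      intro s hs; simp only [beq_eq_false_iff_ne]; rintro rfl; exact hm hs
    have hg : ∀ s ∈ pvAllKeys, (s == t) = false := by
      intro s hs; simp only [beq_eq_false_iff_ne]; rintro rfl; exact hm hs
    have hP : ∀ s ∈ pvAllKeys, ¬ (t = s) := fun s hs h => hm (h ▸ hs)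
    unfold pvBodyA pvBodyB
    simp only [pvCanonical, pvIndex, PySem.Dict.getD, PySem.Dict.get?,
      List.find?, List.foldl, PySem.Set.contains, List.contains]
    simp [hf, hg, hP, pvAllKeys, PySem.Set.update]

-- ===== VERDICT =====
theorem color_aliases_py_spec : Claim_equal_color_aliases_py := by
  intro color _
  show color_aliases_py color = color_aliases_py_alt color
  rw [alt_eq_body]
  exact pvBody_eq _
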